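-- pv_equiv track=rewrite | github.com/KasperGoes/Blufpoker | utils.py | ranks_2_dice
-- ===== SOURCE A (Python) =====
-- def create_ranks(array):
--
--     arrayint = [int(''.join(map(str, sorted(i, reverse=True)))) for i in array]
--     ranking_dict = {}
--     for tuple_value in array:
--
--         counter = 0
--         integer = int(''.join(map(str, sorted(tuple_value, reverse=True))))
--         for number in arrayint:
--             if integer > number:
--                 counter+=1
--         ranking_dict[tuple_value] = counter
--
--     return ranking_dict
--
-- def ranks_2_dice(hastoinclude_value=()):
--
--     possible_throws = []
--     for i in range(1, 7):
--         for j in range(1,7):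
--                 possible_throws.append((i,j))
--
--     if hastoinclude_value is not ():
--
--         remaining_possibble_throws = [tup for tup in possible_throws if all(num in tup for num in hastoinclude_value)]
--         remaining_possibble_throws_with_rankings  = create_ranks(remaining_possibble_throws)
--     else:
--         remaining_possibble_throws_with_rankings  = create_ranks(possible_throws)
--
--
--     return remaining_possibble_throws_with_rankings
-- ===== SOURCE B (Python) =====
-- def ranks_2_dice(hastoinclude_value=()):
--     # value of a throw (digits 1..6) is 10*max+min; rank = number of strictly
--     # smaller values, read off a histogram of values instead of pairwise comparison
--     throws = []
--     for i in range(1, 7):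
--         for j in range(1, 7):
--             if all(num in (i, j) for num in hastoinclude_value):
--                 throws.append((i, j))
--     vals = [10 * max(i, j) + min(i, j) for (i, j) in throws]
--     counts = {}
--     for v in vals:
--         counts[v] = counts.get(v, 0) + 1
--     return {(i, j): sum(counts.get(v, 0) for v in range(11, 10 * max(i, j) + min(i, j)))
--             for (i, j) in throws}
-- ===== Notes on version B (the rewrite author's own statement) =====
-- stated objective: alternative
-- what changed: Replaced A's per-throw string-building value plus quadratic strictly-smaller scan by an arithmetic value (10*max+min), a histogram of values built once, and each rank read as the sum of histogram buckets below the throw's value.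
import Mathlib
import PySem

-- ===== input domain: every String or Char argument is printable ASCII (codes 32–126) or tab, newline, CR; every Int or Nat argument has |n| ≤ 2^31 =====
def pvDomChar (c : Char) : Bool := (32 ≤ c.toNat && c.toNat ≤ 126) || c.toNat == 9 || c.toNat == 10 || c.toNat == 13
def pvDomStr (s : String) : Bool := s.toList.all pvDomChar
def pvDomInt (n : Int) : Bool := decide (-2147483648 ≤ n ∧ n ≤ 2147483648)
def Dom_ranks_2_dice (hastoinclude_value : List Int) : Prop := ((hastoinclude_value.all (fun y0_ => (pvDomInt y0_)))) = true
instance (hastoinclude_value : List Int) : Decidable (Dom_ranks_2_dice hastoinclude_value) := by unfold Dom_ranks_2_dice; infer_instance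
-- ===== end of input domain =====

-- B values each throw arithmetically (10*max+min) and ranks it by summing a histogram of
-- values below it, instead of A's per-throw string-built value and quadratic pairwise scan.


-- ===== PORT A =====
-- int(''.join(map(str, sorted(t, reverse=True)))) ; int() never raises here: on every
-- reachable call the joined string is a concatenation of the digits 1..6, so ofStr? is
-- some; .getD 0 is never the default on reachable inputs.
def pvValA (t : Int × Int) : Int :=
  (PySem.Int.ofStr? (PySem.Str.join "" ((PySem.List.sorted [t.1, t.2] (fun x => x) true).map PySem.Int.toStr))).getD 0

def create_ranks (array : List (Int × Int)) : PySem.Dict (Int × Int) Int :=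
  let arrayint := array.map pvValA
  array.foldl (fun d tuple_value =>
    let integer := pvValA tuple_value
    let counter := arrayint.foldl (fun c number => if integer > number then c + 1 else c) (0 : Int)
    d.insert tuple_value counter) PySem.Dict.empty

def ranks_2_dice (hastoinclude_value : List Int) : List (Int × Int × Int) :=
  let possible_throws : List (Int × Int) :=
    (PySem.List.pyRange 1 7 1).foldl (fun acc i =>
      (PySem.List.pyRange 1 7 1).foldl (fun acc j => acc ++ [(i, j)]) acc) []
  -- `hastoinclude_value is not ()`: a list argument is never identical to the empty tuple, so the branch is always taken
  let remaining_possibble_throws :=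
    possible_throws.filter (fun tup => hastoinclude_value.all (fun num => num == tup.1 || num == tup.2))
  (create_ranks remaining_possibble_throws).items.map (fun p => (p.1.1, p.1.2, p.2))

-- ===== PORT B =====
-- 10 * max(i, j) + min(i, j)
def pvVal10 (t : Int × Int) : Int := 10 * max t.1 t.2 + min t.1 t.2

def ranks_2_dice_alt (hastoinclude_value : List Int) : List (Int × Int × Int) :=
  -- generation with the filter fused into the inner loop
  let throws : List (Int × Int) :=
    (PySem.List.pyRange 1 7 1).foldl (fun acc i =>
      (PySem.List.pyRange 1 7 1).foldl (fun acc j =>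
        if hastoinclude_value.all (fun num => num == i || num == j) then acc ++ [(i, j)] else acc) acc) []
  let vals := throws.map pvVal10
  -- histogram: counts[v] = counts.get(v, 0) + 1
  let counts := vals.foldl (fun d v => d.insert v (d.getD v 0 + 1)) PySem.Dict.empty
  -- rank(t) = sum(counts.get(v, 0) for v in range(11, value(t)))
  (throws.foldl (fun d t =>
      d.insert t (((PySem.List.pyRange 11 (pvVal10 t) 1).map (fun v => counts.getD v 0)).sum))
    PySem.Dict.empty).items.map (fun p => (p.1.1, p.1.2, p.2))

-- ===== PRECONDITION & SPEC =====
def Spec_ranks_2_dice (hastoinclude_value : List Int) (out : List (Int × Int × Int)) : Prop := out = ranks_2_dice_alt hastoinclude_value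
instance (hastoinclude_value : List Int) (out : List (Int × Int × Int)) : Decidable (Spec_ranks_2_dice hastoinclude_value out) := by unfold Spec_ranks_2_dice; infer_instance

-- ===== CLAIM (what is proved, stated in full; the proofs are below) =====
def Claim_equal_ranks_2_dice : Prop := ∀ (hastoinclude_value : List Int), Dom_ranks_2_dice hastoinclude_value → Spec_ranks_2_dice hastoinclude_value (ranks_2_dice hastoinclude_value)

-- ===== LEMMAS AND PROOFS =====

-- A's generate-then-filter throw list as a filtered cartesian product
theorem pv_throwsA (hv : List Int) :
    ((PySem.List.pyRange 1 7 1).foldl (fun acc i =>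
        (PySem.List.pyRange 1 7 1).foldl (fun acc j => acc ++ [(i, j)]) acc) ([] : List (Int × Int))).filter
        (fun tup => hv.all (fun num => num == tup.1 || num == tup.2))
      = (PySem.List.pyRange 1 7 1).flatMap (fun i =>
          ((PySem.List.pyRange 1 7 1).filter (fun j => hv.all (fun num => num == i || num == j))).map (fun j => (i, j))) := by
  simp only [PySem.List.foldl_append_singleton_eq_map, PySem.List.foldl_append_eq_flatMap]
  simp [List.filter_flatMap, List.filter_map, Function.comp_def]

-- B's fused generation loop gives the same filtered cartesian product
theorem pv_throwsB (hv : List Int) :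
    ((PySem.List.pyRange 1 7 1).foldl (fun acc i =>
        (PySem.List.pyRange 1 7 1).foldl (fun acc j =>
          if hv.all (fun num => num == i || num == j) then acc ++ [(i, j)] else acc) acc) ([] : List (Int × Int)))
      = (PySem.List.pyRange 1 7 1).flatMap (fun i =>
          ((PySem.List.pyRange 1 7 1).filter (fun j => hv.all (fun num => num == i || num == j))).map (fun j => (i, j))) := by
  simp only [PySem.List.foldl_append_if, PySem.List.foldl_append_eq_flatMap]
  simp

-- any member of the filtered product has dice components
theorem pv_mem_bounds (q : Int → Int → Bool) (t : Int × Int)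
    (h : t ∈ (PySem.List.pyRange 1 7 1).flatMap (fun i =>
        ((PySem.List.pyRange 1 7 1).filter (q i)).map (fun j => (i, j)))) :
    1 ≤ t.1 ∧ t.1 ≤ 6 ∧ 1 ≤ t.2 ∧ t.2 ≤ 6 := by
  simp only [List.mem_flatMap, List.mem_map, List.mem_filter, PySem.List.mem_pyRange_one] at h
  obtain ⟨i, ⟨hi1, hi2⟩, j, ⟨⟨hj1, hj2⟩, _⟩, rfl⟩ := h
  exact ⟨hi1, by omega, hj1, by omega⟩

-- the string-built value equals the arithmetic one on dice components
theorem pv_val_eq (t : Int × Int) (h : 1 ≤ t.1 ∧ t.1 ≤ 6 ∧ 1 ≤ t.2 ∧ t.2 ≤ 6) :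
    pvValA t = pvVal10 t := by
  obtain ⟨i, j⟩ := t
  simp only at h
  obtain ⟨h1, h2, h3, h4⟩ := h
  interval_cases i <;> interval_cases j <;> decide

-- A's counter loop is a countP of strictly smaller values
theorem pv_count_eq (l : List Int) (v : Int) : ∀ c : Int,
    l.foldl (fun c number => if v > number then c + 1 else c) c
      = c + (l.countP (fun n => decide (n < v)) : Int) := by
  induction l with
  | nil => intro c; simp
  | cons x l ih =>
    intro c
    simp only [List.foldl_cons, List.countP_cons]
    by_cases hx : x < v
    · rw [if_pos hx, ih]; simp [hx]; ring
    · rw [if_neg hx, ih]; simp [hx]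

-- countP below c+1 splits off the count of c
theorem pv_countP_succ (l : List Int) (c : Int) :
    l.countP (fun x => decide (x < c + 1)) = l.countP (fun x => decide (x < c)) + l.count c := by
  induction l with
  | nil => simp
  | cons x l ih =>
    simp only [List.countP_cons, List.count_cons, ih, decide_eq_true_eq, beq_iff_eq]
    split_ifs <;> omega

-- a sum of per-bucket counts over [a, a+n) is the countP of strictly smaller elements
theorem pv_sum_count (vals : List Int) (a : Int) (hall : ∀ x ∈ vals, a ≤ x) (n : Nat) :
    (((PySem.List.pyRange a (a + n) 1).map (fun v => (vals.count v : Int))).sum)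
      = (vals.countP (fun x => decide (x < a + n)) : Int) := by
  induction n with
  | zero =>
    rw [show a + (0:Nat) = a by simp, PySem.List.pyRange_one_eq_nil le_rfl]
    have h0 : vals.countP (fun x => decide (x < a)) = 0 :=
      List.countP_eq_zero.2 (fun x hx => by simpa using not_lt.2 (hall x hx))
    simp [h0]
  | succ n ih =>
    have : a + ((n:Int) + 1) = (a + n) + 1 := by ring
    rw [Nat.cast_add, Nat.cast_one, this, PySem.List.pyRange_one_succ_right (by omega),
      pv_countP_succ]
    simp only [List.map_append, List.sum_append, List.map_cons, List.map_nil]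
    rw [ih]
    simp

-- two insert-loops building the same dict from pointwise-equal values
theorem pv_fold_insert_congr (L : List (Int × Int)) (f g : (Int × Int) → Int)
    (h : ∀ t ∈ L, f t = g t) (d : PySem.Dict (Int × Int) Int) :
    L.foldl (fun d t => d.insert t (f t)) d = L.foldl (fun d t => d.insert t (g t)) d := by
  induction L generalizing d with
  | nil => rfl
  | cons t L ih =>
    simp only [List.foldl_cons]
    rw [h t (by simp)]
    exact ih (fun x hx => h x (List.mem_cons_of_mem _ hx)) _

-- ===== VERDICT (by name: the statement is the Claim_ definition above) =====
theorem ranks_2_dice_spec : Claim_equal_ranks_2_dice := by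
  intro hv _
  unfold Spec_ranks_2_dice
  show ranks_2_dice hv = ranks_2_dice_alt hv
  simp only [ranks_2_dice, ranks_2_dice_alt, create_ranks]
  rw [pv_throwsA hv, pv_throwsB hv]
  set L := (PySem.List.pyRange 1 7 1).flatMap (fun i =>
      ((PySem.List.pyRange 1 7 1).filter (fun j => hv.all (fun num => num == i || num == j))).map
        (fun j => (i, j))) with hL
  have hb : ∀ t ∈ L, 1 ≤ t.1 ∧ t.1 ≤ 6 ∧ 1 ≤ t.2 ∧ t.2 ≤ 6 := by
    intro t ht
    exact pv_mem_bounds (fun i j => hv.all (fun num => num == i || num == j)) t (hL ▸ ht)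
  have hmapval : L.map pvValA = L.map pvVal10 :=
    List.map_congr_left (fun t ht => pv_val_eq t (hb t ht))
  congr 1
  congr 1
  apply pv_fold_insert_congr
  intro t ht
  obtain ⟨hb1, hb2, hb3, hb4⟩ := hb t ht
  have hV : 11 ≤ pvVal10 t := by unfold pvVal10; omega
  -- A's side: the counter is a countP
  rw [pv_count_eq, hmapval, pv_val_eq t ⟨hb1, hb2, hb3, hb4⟩, zero_add]
  -- B's side: each bucket lookup is a count
  have hcnt : ∀ v : Int,
      ((L.map pvVal10).foldl (fun d v => d.insert v (d.getD v 0 + 1)) PySem.Dict.empty).getD v 0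
        = ((L.map pvVal10).count v : Int) := by
    intro v
    rw [PySem.Dict.getD_foldl_insert_add_one]
    simp
  simp only [hcnt]
  have hall : ∀ x ∈ L.map pvVal10, (11:Int) ≤ x := by
    intro x hx
    obtain ⟨s, hs, rfl⟩ := List.mem_map.1 hx
    obtain ⟨c1, c2, c3, c4⟩ := hb s hs
    unfold pvVal10; omega
  have hVn : pvVal10 t = 11 + ((pvVal10 t - 11).toNat : Int) := by omega
  rw [hVn, pv_sum_count (L.map pvVal10) 11 hall]
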